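-- pv_equiv track=rewrite | github.com/jeff87654/Lifting | remaining_combos.py | enum_combos
-- ===== SOURCE A (Python) =====
-- from itertools import combinations_with_replacement
--
-- NR_TG = {2:1, 3:2, 4:5, 5:5, 6:16, 7:7, 8:50, 9:34, 10:45, 11:8,
--          12:301, 13:9, 14:63, 15:104, 16:1954, 17:10, 18:983}
--
-- def enum_combos(parts):
--     """Enumerate combo keys as sorted (degree, TI) multiset strings, matching
--     _CacheKeyToFileName's output format."""
--     # Group parts by degree
--     from collections import Counter
--     deg_counts = Counter(parts)
--     # For each degree, list the multisets of TIs (non-decreasing, size = count)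
--     per_degree_sets = []
--     for d, k in sorted(deg_counts.items()):
--         mset_list = list(combinations_with_replacement(range(1, NR_TG[d] + 1), k))
--         per_degree_sets.append([(d, ms) for ms in mset_list])
--     # Cartesian product across degrees
--     result = []
--     def recurse(idx, picked):
--         if idx == len(per_degree_sets):
--             # Merge all picked (d, ms) into sorted (d, ti) pairs
--             pairs = []
--             for d, ms in picked:
--                 for t in ms:
--                     pairs.append((d, t))
--             pairs.sort()
--             result.append(pairs)
--             return
--         for opt in per_degree_sets[idx]:
--             picked.append(opt)
--             recurse(idx + 1, picked)
--             picked.pop()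
--     recurse(0, [])
--     return result
-- ===== SOURCE B (Python) =====
-- from itertools import combinations_with_replacement, product
--
-- NR_TG = {2:1, 3:2, 4:5, 5:5, 6:16, 7:7, 8:50, 9:34, 10:45, 11:8,
--          12:301, 13:9, 14:63, 15:104, 16:1954, 17:10, 18:983}
--
-- def enum_combos(parts):
--     """Enumerate combo keys as sorted (degree, TI) multiset strings, matching
--     _CacheKeyToFileName's output format."""
--     per_degree_sets = [
--         [(d, ms) for ms in combinations_with_replacement(range(1, NR_TG[d] + 1),
--                                                          parts.count(d))]
--         for d in sorted(set(parts))]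
--     return [sorted((d, t) for d, ms in combo for t in ms)
--             for combo in product(*per_degree_sets)]
-- ===== Notes on version B (the rewrite author's own statement) =====
-- stated objective: idiomatic
-- what changed: The hand-written recursion with a mutable picked-stack (and the Counter/items loop building per_degree_sets) is replaced by two comprehensions: per-degree option lists built from sorted(set(parts)) with parts.count, and the Cartesian product taken by itertools.product.
import Mathlib
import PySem

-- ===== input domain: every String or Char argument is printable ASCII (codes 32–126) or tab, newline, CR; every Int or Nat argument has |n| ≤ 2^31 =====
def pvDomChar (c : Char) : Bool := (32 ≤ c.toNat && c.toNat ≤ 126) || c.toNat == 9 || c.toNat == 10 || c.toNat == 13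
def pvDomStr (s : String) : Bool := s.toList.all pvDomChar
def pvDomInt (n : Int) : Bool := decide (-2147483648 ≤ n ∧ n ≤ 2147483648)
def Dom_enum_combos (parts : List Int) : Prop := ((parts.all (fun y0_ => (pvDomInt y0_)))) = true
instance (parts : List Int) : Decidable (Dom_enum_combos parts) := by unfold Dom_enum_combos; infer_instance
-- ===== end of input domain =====

-- B replaces A's hand-written Cartesian-product recursion over a mutable picked-stack (and the
-- Counter/items loop) by comprehensions over sorted(set(parts))/parts.count and itertools.product.

-- ===== PORT A =====
-- the module constant NR_TG (shared by both ports)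
def NRTG : PySem.Dict Int Int :=
  PySem.Dict.ofList [(2,1), (3,2), (4,5), (5,5), (6,16), (7,7), (8,50), (9,34), (10,45), (11,8),
                     (12,301), (13,9), (14,63), (15,104), (16,1954), (17,10), (18,983)]

-- hand port of itertools.combinations_with_replacement(pool, k) (as lists, CPython's lexicographic
-- index order); exact for any pool; shared by both ports (both Pythons call the library function)
def pyCWR (pool : List Int) (k : Nat) : List (List Int) :=
  match k, pool with
  | 0, _ => [[]]
  | _ + 1, [] => []
  | k + 1, x :: xs => (pyCWR (x :: xs) k).map (x :: ·) ++ pyCWR xs (k + 1)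
  termination_by (k, pool.length)

-- A's nested helper 'recurse(idx, picked)': the mutated result list becomes the returned list,
-- picked.append/pop becomes the 'picked ++ [opt]' argument; 'pairs.sort()' on 2-tuples is
-- sorted2 by the two components (Python compares tuples lexicographically)
def recurseA (sets : List (List (Int × List Int))) (picked : List (Int × List Int)) :
    List (List (Int × Int)) :=
  match sets with
  | [] =>
      let pairs := picked.foldl
        (fun pairs dms => dms.2.foldl (fun pairs t => pairs ++ [(dms.1, t)]) pairs) []
      [PySem.List.sorted2 pairs (·.1) (·.2) false]
  | s :: rest => s.foldl (fun res opt => res ++ recurseA rest (picked ++ [opt])) []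

def enum_combos (parts : List Int) : List (List (Int × Int)) :=
  let degCounts := PySem.Dict.counter parts
  let perDegreeSets := (PySem.List.sorted2 degCounts.items (·.1) (·.2) false).foldl
    (fun acc dk =>
      let msetList := pyCWR (PySem.List.pyRange 1 (NRTG.getD dk.1 0 + 1) 1) dk.2.toNat
      acc ++ [msetList.map (fun ms => (dk.1, ms))]) []
  recurseA perDegreeSets []

-- ===== PORT B =====
-- itertools.product(*lists) ported as the standard right-fold Cartesian product (first list slowest)
def pyProduct (sets : List (List (Int × List Int))) : List (List (Int × List Int)) :=
  sets.foldr (fun opts acc => opts.flatMap (fun o => acc.map (o :: ·))) [[]]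

def enum_combos_alt (parts : List Int) : List (List (Int × Int)) :=
  let perDegreeSets := (PySem.List.sorted (PySem.Set.ofList parts) (fun x => x) false).map
    (fun d => (pyCWR (PySem.List.pyRange 1 (NRTG.getD d 0 + 1) 1) (PySem.List.count parts d)).map
      (fun ms => (d, ms)))
  (pyProduct perDegreeSets).map
    (fun combo =>
      PySem.List.sorted2 (combo.flatMap (fun dms => dms.2.map (fun t => (dms.1, t)))) (·.1) (·.2) false)

-- ===== PRECONDITION & SPEC =====
-- Pre_ excludes exactly the inputs where NR_TG[d] raises KeyError in both Pythons (degrees outside 2..18)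
def Pre_enum_combos (parts : List Int) : Prop := ∀ d ∈ parts, 2 ≤ d ∧ d ≤ 18
instance (parts : List Int) : Decidable (Pre_enum_combos parts) := by unfold Pre_enum_combos; infer_instance
def pvWitness_enum_combos : List Int := ([3, 2, 3])

def Spec_enum_combos (parts : List Int) (out : List (List (Int × Int))) : Prop := out = enum_combos_alt parts
instance (parts : List Int) (out : List (List (Int × Int))) : Decidable (Spec_enum_combos parts out) := by unfold Spec_enum_combos; infer_instance

-- ===== CLAIM (what is proved, stated in full; the proofs are below) =====
def Claim_equal_enum_combos : Prop := ∀ (parts : List Int), Dom_enum_combos parts → Pre_enum_combos parts → Spec_enum_combos parts (enum_combos parts)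

-- ===== LEMMAS AND PROOFS =====

-- inserting with two comparison functions that agree on (x, y) for every y in the list
theorem insertBy_congr {α : Type} (lt1 lt2 : α → α → Bool) (x : α) (ys : List α)
    (h : ∀ y ∈ ys, lt1 x y = lt2 x y) :
    PySem.List.insertBy lt1 x ys = PySem.List.insertBy lt2 x ys := by
  induction ys with
  | nil => rfl
  | cons y ys ih =>
    simp only [PySem.List.insertBy]
    rw [h y (by simp)]
    split
    · rfl
    · rw [ih (fun z hz => h z (by simp [hz]))]

-- sorted2 by (fst, snd) is sorted by fst when the fst components are pairwise distinct
theorem sorted2_eq_sorted_fst {β : Type} [LinearOrder β] [DecidableEq β]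
    (xs : List (Int × β)) (h : (xs.map (·.1)).Nodup) :
    PySem.List.sorted2 xs (·.1) (·.2) false = PySem.List.sorted xs (·.1) false := by
  simp only [PySem.List.sorted2, PySem.List.sorted]
  suffices H : ∀ (l acc : List (Int × β)),
      (∀ x ∈ l, ∀ y ∈ acc, x.1 ≠ y.1) → (l.map (·.1)).Nodup →
      l.foldl (fun acc x => PySem.List.insertBy
        (fun a b => decide (a.1 < b.1) || !decide (b.1 < a.1) && decide (a.2 < b.2)) x acc) acc
      = l.foldl (fun acc x => PySem.List.insertBy (fun a b => decide (a.1 < b.1)) x acc) acc by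
    exact H xs [] (by simp) h
  intro l
  induction l with
  | nil => intro acc _ _; rfl
  | cons x t ih =>
    intro acc hd hn
    simp only [List.foldl_cons]
    rw [insertBy_congr]
    · apply ih
      · intro z hz y hy
        have hy' := (PySem.List.insertBy_mem_iff _ _ _ _).mp hy
        rcases hy' with rfl | hy'
        · simp only [List.map_cons, List.nodup_cons] at hn
          intro he
          exact hn.1 (List.mem_map.mpr ⟨z, hz, he⟩)
        · exact hd z (by simp [hz]) y hy'
      · simp only [List.map_cons, List.nodup_cons] at hn
        exact hn.2
    · intro y hy
      have hne : x.1 ≠ y.1 := hd x (by simp) y hy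
      rcases lt_trichotomy x.1 y.1 with hlt | heq | hgt
      · simp [hlt, not_lt_of_gt hlt]
      · exact absurd heq hne
      · simp [hgt, not_lt_of_gt hgt]

-- A's sorted Counter items are B's sorted distinct degrees paired with their counts
theorem sorted_counter_items (parts : List Int) :
    PySem.List.sorted2 (PySem.Dict.counter parts).items (·.1) (·.2) false
      = (PySem.List.sorted (PySem.Set.ofList parts) (fun x => x) false).map
          (fun k => (k, (List.count k parts : Int))) := by
  have hkeys : ((PySem.Dict.counter parts).items.map (·.1)).Nodup := by
    have := PySem.Dict.nodup_keys_counter parts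
    simpa [PySem.Dict.keys] using this
  rw [sorted2_eq_sorted_fst _ hkeys]
  apply PySem.List.sorted_eq_of_perm_of_pairwise_lt
  · rw [PySem.Dict.items_counter]
    exact (PySem.List.sorted_perm _ _ _).map _
  · have := PySem.List.sorted_ofList_pairwise_lt (xs := parts)
    exact List.pairwise_map.mpr (by simpa using this)

-- A's pairs-building loop is a flatMap
theorem pairs_loop_eq (picked : List (Int × List Int)) :
    picked.foldl (fun pairs dms => dms.2.foldl (fun pairs t => pairs ++ [(dms.1, t)]) pairs)
        ([] : List (Int × Int))
      = picked.flatMap (fun dms => dms.2.map (fun t => (dms.1, t))) := by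
  rw [PySem.List.foldl_congr_mem _ _ (fun pairs dms => pairs ++ dms.2.map (fun t => (dms.1, t))) _
    (fun acc x _ => PySem.List.foldl_append_singleton_eq_map _ _ _)]
  rw [PySem.List.foldl_append_eq_flatMap, List.nil_append]

-- recurseA is the mapped Cartesian product
theorem recurseA_eq (sets : List (List (Int × List Int))) (picked : List (Int × List Int)) :
    recurseA sets picked = (pyProduct sets).map
      (fun c => PySem.List.sorted2 ((picked ++ c).flatMap (fun dms => dms.2.map (fun t => (dms.1, t))))
        (·.1) (·.2) false) := by
  induction sets generalizing picked with
  | nil =>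
    simp only [recurseA, pyProduct, List.foldr_nil, List.map_cons, List.map_nil, List.append_nil]
    rw [pairs_loop_eq]
  | cons s rest ih =>
    simp only [recurseA, pyProduct] at *
    rw [PySem.List.foldl_append_eq_flatMap (g := fun opt => recurseA rest (picked ++ [opt])),
      List.nil_append, List.foldr_cons, List.map_flatMap]
    congr 1
    funext opt
    rw [ih (picked ++ [opt]), List.map_map]
    congr 1
    funext c
    simp only [Function.comp]
    rw [List.append_cons picked opt c]

-- ===== VERDICT (by name: the statement is the Claim_ definition above) =====
theorem enum_combos_spec : Claim_equal_enum_combos := by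
  intro parts _ _
  unfold Spec_enum_combos enum_combos enum_combos_alt
  dsimp only
  rw [sorted_counter_items]
  have hsets := PySem.List.foldl_append_singleton_eq_map
    (f := fun (dk : Int × Int) =>
      (pyCWR (PySem.List.pyRange 1 (NRTG.getD dk.1 0 + 1) 1) dk.2.toNat).map (fun ms => (dk.1, ms)))
    ((PySem.List.sorted (PySem.Set.ofList parts) (fun x => x) false).map
      (fun k => (k, (List.count k parts : Int)))) []
  rw [List.nil_append] at hsets
  rw [hsets, recurseA_eq]
  rw [List.map_map]
  congr 2
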